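-- pv_equiv track=rewrite | github.com/BrettRey/erdos-problem-993 | conjecture_a_mode_tie_focused_scan.py | balanced_len2_spider_k
-- ===== SOURCE A (Python) =====
-- def balanced_len2_spider_k(adj: list[list[int]]) -> int:
--     n = len(adj)
--     deg = [len(nb) for nb in adj]
--     k = max(deg)
--     if n != 2 * k + 1:
--         return 0
--     if deg.count(k) != 1 or deg.count(1) != k or deg.count(2) != k:
--         return 0
--
--     center = deg.index(k)
--     if any(deg[u] != 2 for u in adj[center]):
--         return 0
--
--     for u in adj[center]:
--         other = [v for v in adj[u] if v != center]
--         if len(other) != 1: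
--             return 0
--         leaf = other[0]
--         if deg[leaf] != 1:
--             return 0
--
--     return k
-- ===== SOURCE B (Python) =====
-- def balanced_len2_spider_k(adj: list[list[int]]) -> int:
--     n = len(adj)
--     deg = [len(nb) for nb in adj]
--     k = max(deg)
--     if n != 2 * k + 1:
--         return 0
--     if deg.count(k) != 1 or deg.count(1) != k or deg.count(2) != k:
--         return 0
--     center = deg.index(k)
--     # classify: a "good middle" is a degree-2 vertex joined to the center on one
--     # side and to a degree-1 leaf on the other; accept iff every neighbour of
--     # the center is a good middle
--     good = set()
--     for u, nbrs in enumerate(adj):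
--         if len(nbrs) == 2:
--             a, b = nbrs
--             if a == center and b != center and deg[b] == 1:
--                 good.add(u)
--             elif b == center and a != center and deg[a] == 1:
--                 good.add(u)
--     return k if set(adj[center]) <= good else 0
-- ===== Notes on version B (the rewrite author's own statement) =====
-- stated objective: alternative
-- what changed: B keeps the degree-count guards but replaces A's two sequential walks over adj[center] (an any() degree check plus a per-neighbour filter loop) with one classification pass over all rows that builds the set of 'good middles' (degree-2 rows wired as [center, leaf] with deg[leaf]==1 in either order) and then tests set(adj[center]) <= good.
-- outside the precondition, e.g. on balanced_len2_spider_k([[-6, 2, 3], [0, 4], [0, 5], [0, 6], [1], [2], [3]]): A returns 3, B returns 0; on balanced_len2_spider_k([]): A raises ValueError, B raises ValueError; on balanced_len2_spider_k([[1, 2, 9], [0, 4], [0, 5], [0, 6], [1], [2], [3]]): A raises IndexError, B returns 0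
import Mathlib
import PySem

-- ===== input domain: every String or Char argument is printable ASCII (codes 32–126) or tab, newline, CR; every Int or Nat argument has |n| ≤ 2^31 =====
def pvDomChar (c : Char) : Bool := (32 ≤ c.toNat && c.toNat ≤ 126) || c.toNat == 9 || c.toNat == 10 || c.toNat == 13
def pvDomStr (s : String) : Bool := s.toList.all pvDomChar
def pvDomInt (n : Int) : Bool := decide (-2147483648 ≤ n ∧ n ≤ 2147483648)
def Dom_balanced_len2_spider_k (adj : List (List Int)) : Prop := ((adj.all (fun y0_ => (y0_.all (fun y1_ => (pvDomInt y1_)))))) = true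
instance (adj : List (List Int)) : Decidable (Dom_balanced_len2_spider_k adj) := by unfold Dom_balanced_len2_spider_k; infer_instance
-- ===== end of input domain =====

-- B re-checks the same count guards but then classifies ALL degree-2 rows into a set of
-- "good middles" (joined to the center and to a degree-1 leaf) and tests set(adj[center]) ⊆ good,
-- instead of A's two sequential walks over adj[center]; objective: alternative decomposition.

-- ===== PORT A =====
-- A's second loop ('for u in adj[center]: …'), step for step
def pvALoop (deg : List Int) (adj : List (List Int)) (center k : Int) : List Int → Int
  | [] => k
  | u :: rest =>
    let other := ((PySem.List.pyGet? adj u).getD []).filter (fun v => v ≠ center)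
    if (other.length : Int) ≠ 1 then 0
    else
      let leaf := (PySem.List.pyGet? other 0).getD 0
      if (PySem.List.pyGet? deg leaf).getD 0 ≠ 1 then 0
      else pvALoop deg adj center k rest

def balanced_len2_spider_k (adj : List (List Int)) : Int :=
  let n : Int := adj.length
  let deg : List Int := adj.map (fun nb => (nb.length : Int))
  let k : Int := ((PySem.List.max? deg (fun x => x)).getD 0)
  if n ≠ 2 * k + 1 then 0
  else if (PySem.List.count deg k : Int) ≠ 1 ∨ (PySem.List.count deg 1 : Int) ≠ k
          ∨ (PySem.List.count deg 2 : Int) ≠ k then 0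
  else
    let center : Int := (((PySem.List.index? deg k).getD 0 : Nat) : Int)
    let cadj : List Int := (PySem.List.pyGet? adj center).getD []
    if cadj.any (fun u => (PySem.List.pyGet? deg u).getD 0 ≠ 2) then 0
    else pvALoop deg adj center k cadj

-- ===== PORT B =====
-- Source B's loop body: add u to 'good' when its two neighbours are (center, leaf) in either order
def pvBStep (deg : List Int) (center : Int) (s : PySem.Set Int) (p : Int × List Int) : PySem.Set Int :=
  match p.2 with
  | [a, b] =>
    if a = center ∧ b ≠ center ∧ (PySem.List.pyGet? deg b).getD 0 = 1 then PySem.Set.add s p.1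
    else if b = center ∧ a ≠ center ∧ (PySem.List.pyGet? deg a).getD 0 = 1 then PySem.Set.add s p.1
    else s
  | _ => s

def balanced_len2_spider_k_alt (adj : List (List Int)) : Int :=
  let n : Int := adj.length
  let deg : List Int := adj.map (fun nb => (nb.length : Int))
  let k : Int := ((PySem.List.max? deg (fun x => x)).getD 0)
  if n ≠ 2 * k + 1 then 0
  else if (PySem.List.count deg k : Int) ≠ 1 ∨ (PySem.List.count deg 1 : Int) ≠ k
          ∨ (PySem.List.count deg 2 : Int) ≠ k then 0
  else
    let center : Int := (((PySem.List.index? deg k).getD 0 : Nat) : Int)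
    let good : PySem.Set Int := (PySem.List.enumerate adj 0).foldl (pvBStep deg center) PySem.Set.empty
    let cadj : List Int := (PySem.List.pyGet? adj center).getD []
    if PySem.Set.issubset (PySem.Set.ofList cadj) good then k else 0

-- ===== PRECONDITION & SPEC =====
-- the count guards of both programs, as a closed-form condition on the input
def pvGuards (adj : List (List Int)) : Prop :=
  let deg : List Int := adj.map (fun nb => (nb.length : Int))
  let k : Int := ((PySem.List.max? deg (fun x => x)).getD 0)
  (adj.length : Int) = 2 * k + 1 ∧ (PySem.List.count deg k : Int) = 1
    ∧ (PySem.List.count deg 1 : Int) = k ∧ (PySem.List.count deg 2 : Int) = k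

-- Pre_ excludes the empty graph (A's max(deg) raises ValueError) and, on inputs passing the
-- count guards, adjacency entries outside [0, n) — malformed adjacency lists on which A either
-- raises IndexError or silently wraps negative indices (A may still return there; see cites).
def Pre_balanced_len2_spider_k (adj : List (List Int)) : Prop :=
  adj ≠ [] ∧ (pvGuards adj → ∀ row ∈ adj, ∀ v ∈ row, 0 ≤ v ∧ v < (adj.length : Int))

instance (adj : List (List Int)) : Decidable (Pre_balanced_len2_spider_k adj) := by
  unfold Pre_balanced_len2_spider_k pvGuards; infer_instance

def pvWitness_balanced_len2_spider_k : List (List Int) :=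
  [[1, 2, 3], [0, 4], [0, 5], [0, 6], [1], [2], [3]]

def Spec_balanced_len2_spider_k (adj : List (List Int)) (out : Int) : Prop := out = balanced_len2_spider_k_alt adj
instance (adj : List (List Int)) (out : Int) : Decidable (Spec_balanced_len2_spider_k adj out) := by unfold Spec_balanced_len2_spider_k; infer_instance

-- ===== CLAIM (what is proved, stated in full; the proofs are below) =====
def Claim_equal_balanced_len2_spider_k : Prop := ∀ (adj : List (List Int)), Dom_balanced_len2_spider_k adj → Pre_balanced_len2_spider_k adj → Spec_balanced_len2_spider_k adj (balanced_len2_spider_k adj)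

-- ===== LEMMAS AND PROOFS =====

-- membership in B's 'good' set, by fold induction
theorem pv_mem_foldl_bstep (deg : List Int) (center : Int) :
    ∀ (l : List (Int × List Int)) (s : PySem.Set Int) (x : Int),
      x ∈ l.foldl (pvBStep deg center) s ↔
        x ∈ s ∨ ∃ p ∈ l, x = p.1 ∧ ∃ a b, p.2 = [a, b] ∧
          ((a = center ∧ b ≠ center ∧ (PySem.List.pyGet? deg b).getD 0 = 1) ∨
           (b = center ∧ a ≠ center ∧ (PySem.List.pyGet? deg a).getD 0 = 1)) := by
  intro l
  induction l with
  | nil => simp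
  | cons p t ih =>
    intro s x
    obtain ⟨i, row⟩ := p
    simp only [List.foldl_cons, ih]
    have hstep : ∀ y, y ∈ pvBStep deg center s (i, row) ↔
        y ∈ s ∨ (y = i ∧ ∃ a b, row = [a, b] ∧
          ((a = center ∧ b ≠ center ∧ (PySem.List.pyGet? deg b).getD 0 = 1) ∨
           (b = center ∧ a ≠ center ∧ (PySem.List.pyGet? deg a).getD 0 = 1))) := by
      intro y
      rcases row with _ | ⟨a, _ | ⟨b, _ | ⟨c, r⟩⟩⟩
      · simp [pvBStep]
      · simp [pvBStep]
      · simp only [pvBStep]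
        split_ifs with h1 h2 <;> simp [PySem.Set.mem_add] <;> tauto
      · simp [pvBStep]
    constructor
    · rintro (hs | ⟨q, hq, hrest⟩)
      · rcases (hstep x).1 hs with h | ⟨hy, hb⟩
        · exact .inl h
        · exact .inr ⟨(i, row), by simp, hy, hb⟩
      · exact .inr ⟨q, List.mem_cons_of_mem _ hq, hrest⟩
    · rintro (hs | ⟨q, hq, hx, a, b, hrow, hc⟩)
      · exact .inl ((hstep x).2 (.inl hs))
      · rcases List.mem_cons.1 hq with hq | hq
        · subst hq
          exact .inl ((hstep x).2 (.inr ⟨hx, a, b, hrow, hc⟩))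
        · exact .inr ⟨q, hq, hx, a, b, hrow, hc⟩

-- A's loop returns k iff every u in the list passes both of A's per-u checks
theorem pv_aLoop_eq (deg : List Int) (adj : List (List Int)) (center k : Int) :
    ∀ (L : List Int), pvALoop deg adj center k L =
      if L.all (fun u =>
        decide (((((PySem.List.pyGet? adj u).getD []).filter (fun v => v ≠ center)).length : Int) = 1 ∧
          (PySem.List.pyGet? deg ((PySem.List.pyGet? (((PySem.List.pyGet? adj u).getD []).filter (fun v => v ≠ center)) 0).getD 0)).getD 0 = 1))
      then k else 0 := by
  intro L
  induction L with
  | nil => simp [pvALoop]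
  | cons u t ih =>
    rw [pvALoop]
    simp only [List.all_cons]
    by_cases h1 : ((((PySem.List.pyGet? adj u).getD []).filter (fun v => v ≠ center)).length : Int) = 1
    · rw [if_neg (not_not_intro h1)]
      by_cases h2 : (PySem.List.pyGet? deg ((PySem.List.pyGet? (((PySem.List.pyGet? adj u).getD []).filter (fun v => v ≠ center)) 0).getD 0)).getD 0 = 1
      · rw [if_neg (not_not_intro h2), ih]
        simp only [decide_eq_true (show _ ∧ _ from ⟨h1, h2⟩), Bool.true_and]
      · rw [if_pos h2]
        simp only [decide_eq_false (show ¬(_ ∧ _) from fun hc => h2 hc.2), Bool.false_and, Bool.false_eq_true, if_false]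
    · rw [if_pos h1]
      simp only [decide_eq_false (show ¬(_ ∧ _) from fun hc => h1 hc.1), Bool.false_and, Bool.false_eq_true, if_false]

-- per-row: B's pattern condition = A's filter-based condition, for a row of any shape
theorem pv_row_iff (deg : List Int) (center : Int) (row : List Int) :
    (∃ a b, row = [a, b] ∧
      ((a = center ∧ b ≠ center ∧ (PySem.List.pyGet? deg b).getD 0 = 1) ∨
       (b = center ∧ a ≠ center ∧ (PySem.List.pyGet? deg a).getD 0 = 1)))
    ↔ ((row.length : Int) = 2 ∧ ((row.filter (fun v => v ≠ center)).length : Int) = 1 ∧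
       (PySem.List.pyGet? deg ((PySem.List.pyGet? (row.filter (fun v => v ≠ center)) 0).getD 0)).getD 0 = 1) := by
  rcases row with _ | ⟨a, _ | ⟨b, _ | ⟨c, r⟩⟩⟩
  · simp
  · simp
  · constructor
    · rintro ⟨a', b', hab, hc⟩
      obtain ⟨rfl, rfl⟩ : a' = a ∧ b' = b := by
        refine ⟨?_, ?_⟩ <;> injection hab with h1 h2 <;> try exact h1.symm
        injection h2 with h3
        exact h3.symm
      refine ⟨by simp, ?_⟩
      rcases hc with ⟨rfl, hb, hleaf⟩ | ⟨rfl, ha, hleaf⟩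
      · simp [List.filter, hb, hleaf]
      · simp [List.filter, ha, hleaf]
    · rintro ⟨-, hlen, hleaf⟩
      refine ⟨a, b, rfl, ?_⟩
      by_cases ha : a = center <;> by_cases hb : b = center
      · simp [List.filter, ha, hb] at hlen
      · simp [List.filter, ha, hb] at hlen hleaf ⊢
        exact hleaf
      · simp [List.filter, ha, hb] at hlen hleaf ⊢
        exact hleaf
      · simp [List.filter, ha, hb] at hlen
  · constructor
    · rintro ⟨a', b', hab, -⟩
      exact absurd hab (by simp)
    · rintro ⟨h2, -, -⟩
      exfalso
      simp at h2
      omega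

-- membership in B's 'good' for an in-range u = A's per-u conditions
theorem pv_good_iff (adj : List (List Int)) (center : Int) (u : Int)
    (hu0 : 0 ≤ u) (hun : u < (adj.length : Int)) :
    (u ∈ (PySem.List.enumerate adj).foldl
        (pvBStep (adj.map (fun nb => (nb.length : Int))) center) PySem.Set.empty) ↔
      ((PySem.List.pyGet? (adj.map (fun nb => (nb.length : Int))) u).getD 0 = 2 ∧
       ((((PySem.List.pyGet? adj u).getD []).filter (fun v => v ≠ center)).length : Int) = 1 ∧
       (PySem.List.pyGet? (adj.map (fun nb => (nb.length : Int)))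
         ((PySem.List.pyGet? (((PySem.List.pyGet? adj u).getD []).filter (fun v => v ≠ center)) 0).getD 0)).getD 0 = 1) := by
  have hlen : u.toNat < adj.length := by omega
  have hrow : PySem.List.pyGet? adj u = some adj[u.toNat] :=
    PySem.List.pyGet?_eq_some_getElem adj hu0 hun
  have hdegu : PySem.List.pyGet? (adj.map (fun nb => (nb.length : Int))) u
      = some ((adj[u.toNat].length : Int)) := by
    have := PySem.List.pyGet?_eq_some_getElem (adj.map (fun nb => (nb.length : Int)))
      (i := u) hu0 (by simpa using hun)
    simpa using this
  rw [pv_mem_foldl_bstep]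
  have hempty : u ∈ (PySem.Set.empty : PySem.Set Int) ↔ False := by
    simp [PySem.Set.empty]
  rw [hrow, hdegu]
  simp only [hempty, false_or, Option.getD_some]
  rw [← pv_row_iff (adj.map (fun nb => (nb.length : Int))) center adj[u.toNat]]
  constructor
  · rintro ⟨p, hp, hu, a, b, hab, hc⟩
    obtain ⟨j, hj, rfl⟩ := (PySem.List.mem_enumerate_iff adj 0 p).1 hp
    refine ⟨a, b, ?_, hc⟩
    have hju : j = u.toNat := by
      simp only [zero_add] at hu
      omega
    subst hju
    simpa using hab
  · rintro ⟨a, b, hab, hc⟩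
    refine ⟨((u.toNat : Int), adj[u.toNat]), ?_, by simp [Int.toNat_of_nonneg hu0], a, b, hab, hc⟩
    rw [PySem.List.mem_enumerate_iff]
    exact ⟨u.toNat, hlen, by simp⟩

-- the final branch of both programs, once the count guards have passed
theorem pv_final (adj : List (List Int)) (deg : List Int) (k center : Int) (c : Nat)
    (hdeg : deg = adj.map (fun nb => (nb.length : Int)))
    (hidx : PySem.List.index? deg k = some c)
    (hcenter : center = (c : Int))
    (hrange : ∀ row ∈ adj, ∀ v ∈ row, 0 ≤ v ∧ v < (adj.length : Int)) :
    (if ((PySem.List.pyGet? adj center).getD []).any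
         (fun u => decide ((PySem.List.pyGet? deg u).getD 0 ≠ 2)) = true then 0
     else pvALoop deg adj center k ((PySem.List.pyGet? adj center).getD []))
    = (if PySem.Set.issubset (PySem.Set.ofList ((PySem.List.pyGet? adj center).getD []))
          ((PySem.List.enumerate adj).foldl (pvBStep deg center) PySem.Set.empty) = true
       then k else 0) := by
  obtain ⟨hc, hdc, -⟩ := PySem.List.getElem_of_index?_eq_some hidx
  have hclen : c < adj.length := by
    subst hdeg; simpa using hc
  have hcadj : (PySem.List.pyGet? adj center).getD [] = adj[c] := by
    rw [hcenter]
    simp [hclen]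
  have hbound : ∀ u ∈ adj[c], 0 ≤ u ∧ u < (adj.length : Int) :=
    fun u hu => hrange adj[c] (List.getElem_mem hclen) u hu
  have hgood : ∀ u ∈ adj[c],
      (u ∈ (PySem.List.enumerate adj).foldl (pvBStep deg center) PySem.Set.empty ↔
        ((PySem.List.pyGet? deg u).getD 0 = 2 ∧
         ((((PySem.List.pyGet? adj u).getD []).filter (fun v => v ≠ center)).length : Int) = 1 ∧
         (PySem.List.pyGet? deg ((PySem.List.pyGet? (((PySem.List.pyGet? adj u).getD []).filter (fun v => v ≠ center)) 0).getD 0)).getD 0 = 1)) := by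
    intro u hu
    subst hdeg
    exact pv_good_iff adj center u (hbound u hu).1 (hbound u hu).2
  rw [hcadj, pv_aLoop_eq]
  by_cases hsub : ∀ u ∈ adj[c],
      ((PySem.List.pyGet? deg u).getD 0 = 2 ∧
       ((((PySem.List.pyGet? adj u).getD []).filter (fun v => v ≠ center)).length : Int) = 1 ∧
       (PySem.List.pyGet? deg ((PySem.List.pyGet? (((PySem.List.pyGet? adj u).getD []).filter (fun v => v ≠ center)) 0).getD 0)).getD 0 = 1)
  · have hs : PySem.Set.issubset (PySem.Set.ofList adj[c])
        ((PySem.List.enumerate adj).foldl (pvBStep deg center) PySem.Set.empty) = true := by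
      rw [PySem.Set.issubset_iff]
      intro x hx
      have hx' : x ∈ adj[c] := (PySem.Set.mem_ofList _ _).1 hx
      exact (hgood x hx').2 (hsub x hx')
    rw [if_pos hs, if_neg ?_, if_pos ?_]
    · rw [List.all_eq_true]
      intro u hu
      exact decide_eq_true ⟨(hsub u hu).2.1, (hsub u hu).2.2⟩
    · rw [Bool.not_eq_true, List.any_eq_false]
      intro u hu
      exact fun hd => of_decide_eq_true hd (hsub u hu).1
  · have hs : ¬ (PySem.Set.issubset (PySem.Set.ofList adj[c])
        ((PySem.List.enumerate adj).foldl (pvBStep deg center) PySem.Set.empty) = true) := by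
      intro hcon
      rw [PySem.Set.issubset_iff] at hcon
      exact hsub (fun u hu => (hgood u hu).1 (hcon u ((PySem.Set.mem_ofList _ _).2 hu)))
    rw [if_neg hs]
    by_cases hany : (adj[c].any
        (fun u => decide ((PySem.List.pyGet? deg u).getD 0 ≠ 2))) = true
    · rw [if_pos hany]
    · rw [if_neg hany, if_neg ?_]
      rw [Bool.not_eq_true, List.any_eq_false] at hany
      rw [List.all_eq_true]
      intro hall
      refine hsub (fun u hu => ⟨?_, of_decide_eq_true (hall u hu)⟩)
      have := hany u hu
      exact not_not.1 (fun hx => this (decide_eq_true hx))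

-- ===== VERDICT (by name: the statement is the Claim_ definition above) =====
theorem balanced_len2_spider_k_spec : Claim_equal_balanced_len2_spider_k := by
  intro adj _hdom hpre
  obtain ⟨hne, himp⟩ := hpre
  unfold Spec_balanced_len2_spider_k balanced_len2_spider_k balanced_len2_spider_k_alt
  dsimp only
  by_cases h1 : (adj.length : Int) ≠ 2 * ((PySem.List.max? (adj.map (fun nb => (nb.length : Int))) (fun x => x)).getD 0) + 1
  · rw [if_pos h1, if_pos h1]
  · rw [if_neg h1, if_neg h1]
    by_cases h2 : ((PySem.List.count (adj.map (fun nb => (nb.length : Int))) ((PySem.List.max? (adj.map (fun nb => (nb.length : Int))) (fun x => x)).getD 0) : Int) ≠ 1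
        ∨ (PySem.List.count (adj.map (fun nb => (nb.length : Int))) 1 : Int) ≠ ((PySem.List.max? (adj.map (fun nb => (nb.length : Int))) (fun x => x)).getD 0)
        ∨ (PySem.List.count (adj.map (fun nb => (nb.length : Int))) 2 : Int) ≠ ((PySem.List.max? (adj.map (fun nb => (nb.length : Int))) (fun x => x)).getD 0))
    · rw [if_pos h2, if_pos h2]
    · rw [if_neg h2, if_neg h2]
      rw [not_not] at h1
      rw [not_or, not_not, not_or, not_not, not_not] at h2
      obtain ⟨h2a, h2b, h2c⟩ := h2
      have hg : pvGuards adj := by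
        unfold pvGuards
        exact ⟨h1, h2a, h2b, h2c⟩
      have hrange := himp hg
      have hdne : adj.map (fun nb => (nb.length : Int)) ≠ [] := by simpa using hne
      rcases hmax : PySem.List.max? (adj.map (fun nb => (nb.length : Int))) (fun x => x) with _ | m
      · rw [PySem.List.max?_eq_none_iff] at hmax
        exact absurd hmax hdne
      · rw [hmax]
        simp only [Option.getD_some]
        have hkmem : m ∈ adj.map (fun nb => (nb.length : Int)) := PySem.List.max?_mem hmax
        rcases hidx : PySem.List.index? (adj.map (fun nb => (nb.length : Int))) m with _ | c
        · rw [PySem.List.index?_eq_none_iff] at hidx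
          exact absurd hkmem hidx
        · rw [hidx]
          simp only [Option.getD_some]
          exact pv_final adj _ m _ c rfl hidx rfl hrange
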